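-- pv_equiv track=rewrite | github.com/MaximeNdutiye/ShopifySoftwareProblemS18 | validateMenus.py | traceSubNodes
-- ===== SOURCE A (Python) =====
-- def traceSubNodes(currentNodeId, currentSubNodesList, menuNodesList, debth):
--     nodesTracedList = []
--
--     # max depth is 3, starting at 0
--     if debth == 3:
--         nodesTracedList += menuNodesList[currentNodeId-1].get("child_ids")
--     else:
--         for nodeId in currentSubNodesList:
--             nodesTracedList += traceSubNodes(nodeId-1, menuNodesList[nodeId-1].get("child_ids"),
--                                             menuNodesList, debth+1)
--
--     # return a list of the node ids instead of the indices
--     # add the current node to the traversed nodes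
--     return nodesTracedList + [currentNodeId + 1]
-- ===== SOURCE B (Python) =====
-- def traceSubNodes(currentNodeId, currentSubNodesList, menuNodesList, debth):
--     # depth is capped at 3, so the recursion is unrolled into nested loops
--     out = []
--     if debth == 3:
--         out += menuNodesList[currentNodeId - 1]["child_ids"]
--     elif debth == 2:
--         for n in currentSubNodesList:
--             out += menuNodesList[n - 2]["child_ids"]
--             out.append(n)
--     elif debth == 1:
--         for n in currentSubNodesList:
--             for m in menuNodesList[n - 1]["child_ids"]:
--                 out += menuNodesList[m - 2]["child_ids"]
--                 out.append(m)
--             out.append(n)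
--     elif debth == 0:
--         for n in currentSubNodesList:
--             for m in menuNodesList[n - 1]["child_ids"]:
--                 for k in menuNodesList[m - 1]["child_ids"]:
--                     out += menuNodesList[k - 2]["child_ids"]
--                     out.append(k)
--                 out.append(m)
--             out.append(n)
--     out.append(currentNodeId + 1)
--     return out
-- ===== Notes on version B (the rewrite author's own statement) =====
-- stated objective: simpler
-- what changed: A's recursion (depth capped at 3) is unrolled into straight-line nested loops, one level per depth 0/1/2 plus the depth-3 base case, eliminating recursion and intermediate list concatenations of recursive results.
-- outside the precondition, e.g. on traceSubNodes(2, [1], [{'child_ids': []}], 5): A returns [1, 3], B returns [3]; on traceSubNodes(2, [1], [{'child_ids': []}], -2): A returns [1, 3], B returns [3]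
import Mathlib
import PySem

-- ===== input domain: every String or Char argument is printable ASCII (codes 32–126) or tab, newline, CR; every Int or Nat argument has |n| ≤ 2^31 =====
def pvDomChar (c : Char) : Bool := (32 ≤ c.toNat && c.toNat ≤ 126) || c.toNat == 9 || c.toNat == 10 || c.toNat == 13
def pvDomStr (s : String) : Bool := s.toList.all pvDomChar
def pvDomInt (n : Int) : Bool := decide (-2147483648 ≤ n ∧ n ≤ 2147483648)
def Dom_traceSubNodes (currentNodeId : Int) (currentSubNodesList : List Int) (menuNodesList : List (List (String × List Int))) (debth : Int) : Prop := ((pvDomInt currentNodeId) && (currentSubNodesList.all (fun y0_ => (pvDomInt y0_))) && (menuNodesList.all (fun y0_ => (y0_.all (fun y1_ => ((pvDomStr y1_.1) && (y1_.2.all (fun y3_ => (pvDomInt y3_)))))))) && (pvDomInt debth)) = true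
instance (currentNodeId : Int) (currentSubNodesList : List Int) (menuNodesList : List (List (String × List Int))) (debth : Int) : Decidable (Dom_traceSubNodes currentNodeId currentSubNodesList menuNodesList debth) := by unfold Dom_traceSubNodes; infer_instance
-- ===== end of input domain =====

-- B unrolls A's depth-capped recursion (depth 0..3) into nested loops; objective: simpler control flow, same cost.

-- ===== PORT A =====
-- shared accessor: menuNodesList[i].get("child_ids") / menuNodesList[i]["child_ids"].
-- Where Python raises (index out of range) or .get returns None / [] raises KeyError, the
-- total form returns []; Pre_ excludes exactly those inputs.
def pvChild (menu : List (List (String × List Int))) (i : Int) : List Int :=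
  ((PySem.Dict.ofList (PySem.List.pyGetD menu i [])).get? "child_ids").getD []

-- literal transliteration of A's recursion; fuel only makes it total: behind Pre_
-- (0 ≤ debth ≤ 3, or an empty subnode list) fuel 3 is never exhausted.
def traceA (fuel : Nat) (currentNodeId : Int) (currentSubNodesList : List Int)
    (menuNodesList : List (List (String × List Int))) (debth : Int) : List Int :=
  (if debth = 3 then
    pvChild menuNodesList (currentNodeId - 1)
  else
    match fuel with
    | 0 => []  -- fuel guard, unreachable under Pre_
    | f + 1 =>
      currentSubNodesList.foldl
        (fun acc nodeId =>
          acc ++ traceA f (nodeId - 1) (pvChild menuNodesList (nodeId - 1)) menuNodesList (debth + 1))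
        []) ++ [currentNodeId + 1]

def traceSubNodes (currentNodeId : Int) (currentSubNodesList : List Int) (menuNodesList : List (List (String × List Int))) (debth : Int) : List Int :=
  traceA 3 currentNodeId currentSubNodesList menuNodesList debth

-- ===== PORT B =====
def traceSubNodes_alt (currentNodeId : Int) (currentSubNodesList : List Int) (menuNodesList : List (List (String × List Int))) (debth : Int) : List Int :=
  (if debth = 3 then
    pvChild menuNodesList (currentNodeId - 1)
  else if debth = 2 then
    currentSubNodesList.foldl
      (fun out n => (out ++ pvChild menuNodesList (n - 2)) ++ [n]) []
  else if debth = 1 then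
    currentSubNodesList.foldl
      (fun out n =>
        ((pvChild menuNodesList (n - 1)).foldl
          (fun o m => (o ++ pvChild menuNodesList (m - 2)) ++ [m]) out) ++ [n]) []
  else if debth = 0 then
    currentSubNodesList.foldl
      (fun out n =>
        ((pvChild menuNodesList (n - 1)).foldl
          (fun o m =>
            ((pvChild menuNodesList (m - 1)).foldl
              (fun o2 k => (o2 ++ pvChild menuNodesList (k - 2)) ++ [k]) o) ++ [m]) out) ++ [n]) []
  else []) ++ [currentNodeId + 1]

-- ===== PRECONDITION & SPEC =====
def pvHasChildKey (node : List (String × List Int)) : Bool :=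
  node.any (fun p => p.1 == "child_ids")


-- node index i is in Python's (wraparound) range
def pvInR (menu : List (List (String × List Int))) (i : Int) : Prop :=
  (PySem.List.pyGet? menu i).isSome = true

-- node index i is in range and that node carries the "child_ids" key
def pvOkKey (menu : List (List (String × List Int))) (i : Int) : Prop :=
  ((PySem.List.pyGet? menu i).map pvHasChildKey).getD false = true

-- Pre_ admits the inputs on which Python A completes without an exception, listed per depth:
-- at depth 3 only menuNodesList[currentNodeId-1] is read; at depth ≠ 3 an empty subnode list
-- reads nothing; at depths 2/1/0 every id reached by the (depth-bounded) traversal must index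
-- an in-range node, and each node whose "child_ids" value is consumed must carry that key.
-- Slightly narrower than A's exact crash-free set (a missing key whose None is passed to the
-- ignored depth-3 argument is excluded too); outside Pre_ A raises
-- (IndexError/TypeError/RecursionError) or its value depends on out-of-range-depth recursion.
def Pre_traceSubNodes (currentNodeId : Int) (currentSubNodesList : List Int) (menuNodesList : List (List (String × List Int))) (debth : Int) : Prop :=
  (debth = 3 ∧ pvOkKey menuNodesList (currentNodeId - 1))
  ∨ (debth ≠ 3 ∧ currentSubNodesList = [])
  ∨ (debth = 2 ∧ ∀ n ∈ currentSubNodesList, pvInR menuNodesList (n - 1) ∧ pvOkKey menuNodesList (n - 2))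
  ∨ (debth = 1 ∧ ∀ n ∈ currentSubNodesList, pvOkKey menuNodesList (n - 1) ∧
      ∀ m ∈ pvChild menuNodesList (n - 1), pvInR menuNodesList (m - 1) ∧ pvOkKey menuNodesList (m - 2))
  ∨ (debth = 0 ∧ ∀ n ∈ currentSubNodesList, pvOkKey menuNodesList (n - 1) ∧
      ∀ m ∈ pvChild menuNodesList (n - 1), pvOkKey menuNodesList (m - 1) ∧
        ∀ k ∈ pvChild menuNodesList (m - 1), pvInR menuNodesList (k - 1) ∧ pvOkKey menuNodesList (k - 2))

instance (currentNodeId : Int) (currentSubNodesList : List Int) (menuNodesList : List (List (String × List Int))) (debth : Int) : Decidable (Pre_traceSubNodes currentNodeId currentSubNodesList menuNodesList debth) := by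
  unfold Pre_traceSubNodes pvInR pvOkKey; infer_instance

def pvWitness_traceSubNodes : Int × List Int × (List (List (String × List Int))) × Int :=
  (1, [1], [[("child_ids", [1])]], 2)

def Spec_traceSubNodes (currentNodeId : Int) (currentSubNodesList : List Int) (menuNodesList : List (List (String × List Int))) (debth : Int) (out : List Int) : Prop := out = traceSubNodes_alt currentNodeId currentSubNodesList menuNodesList debth
instance (currentNodeId : Int) (currentSubNodesList : List Int) (menuNodesList : List (List (String × List Int))) (debth : Int) (out : List Int) : Decidable (Spec_traceSubNodes currentNodeId currentSubNodesList menuNodesList debth out) := by unfold Spec_traceSubNodes; infer_instance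

-- ===== CLAIM (what is proved, stated in full; the proofs are below) =====
def Claim_equal_traceSubNodes : Prop := ∀ (currentNodeId : Int) (currentSubNodesList : List Int) (menuNodesList : List (List (String × List Int))) (debth : Int), Dom_traceSubNodes currentNodeId currentSubNodesList menuNodesList debth → Pre_traceSubNodes currentNodeId currentSubNodesList menuNodesList debth → Spec_traceSubNodes currentNodeId currentSubNodesList menuNodesList debth (traceSubNodes currentNodeId currentSubNodesList menuNodesList debth)

-- ===== LEMMAS AND PROOFS =====

-- per-node traced chunk at each unrolled depth (proof-only helpers)
def g3 (menu : List (List (String × List Int))) (m : Int) : List Int := pvChild menu (m - 2) ++ [m]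
def g2 (menu : List (List (String × List Int))) (m : Int) : List Int := (pvChild menu (m - 1)).flatMap (g3 menu) ++ [m]
def g1 (menu : List (List (String × List Int))) (n : Int) : List Int := (pvChild menu (n - 1)).flatMap (g2 menu) ++ [n]

theorem trace_d3 (fuel : Nat) (cur : Int) (subs : List Int) (menu : List (List (String × List Int))) :
    traceA fuel cur subs menu 3 = pvChild menu (cur - 1) ++ [cur + 1] := by
  rw [traceA.eq_def]; simp

theorem trace_d2 (f : Nat) (cur : Int) (subs : List Int) (menu : List (List (String × List Int))) :
    traceA (f + 1) cur subs menu 2 = subs.flatMap (g3 menu) ++ [cur + 1] := by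
  rw [traceA.eq_def]
  simp only [show (2:Int) ≠ 3 by norm_num, if_false, PySem.List.foldl_append_eq_flatMap, List.nil_append]
  congr 1
  apply List.flatMap_congr
  intro x _
  rw [show (2:Int) + 1 = 3 by norm_num, trace_d3, g3,
    show x - 1 - 1 = x - 2 by ring, show x - 1 + 1 = x by ring]

theorem trace_d1 (f : Nat) (cur : Int) (subs : List Int) (menu : List (List (String × List Int))) :
    traceA (f + 2) cur subs menu 1 = subs.flatMap (g2 menu) ++ [cur + 1] := by
  rw [traceA.eq_def]
  simp only [show (1:Int) ≠ 3 by norm_num, if_false, PySem.List.foldl_append_eq_flatMap, List.nil_append]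
  congr 1
  apply List.flatMap_congr
  intro x _
  rw [show (1:Int) + 1 = 2 by norm_num, trace_d2, g2, show x - 1 + 1 = x by ring]

theorem trace_d0 (f : Nat) (cur : Int) (subs : List Int) (menu : List (List (String × List Int))) :
    traceA (f + 3) cur subs menu 0 = subs.flatMap (g1 menu) ++ [cur + 1] := by
  rw [traceA.eq_def]
  simp only [show (0:Int) ≠ 3 by norm_num, if_false, PySem.List.foldl_append_eq_flatMap, List.nil_append]
  congr 1
  apply List.flatMap_congr
  intro x _
  rw [show (0:Int) + 1 = 1 by norm_num, trace_d1, g1, show x - 1 + 1 = x by ring]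

theorem alt_loop2 (menu : List (List (String × List Int))) (init : List Int) (xs : List Int) :
    xs.foldl (fun out n => (out ++ pvChild menu (n - 2)) ++ [n]) init = init ++ xs.flatMap (g3 menu) := by
  have h : (fun (out : List Int) (n : Int) => (out ++ pvChild menu (n - 2)) ++ [n]) =
      fun out n => out ++ g3 menu n := by
    funext o n; rw [g3, List.append_assoc]
  rw [h, PySem.List.foldl_append_eq_flatMap]

theorem alt_loop1 (menu : List (List (String × List Int))) (init : List Int) (xs : List Int) :
    xs.foldl (fun out n =>
        ((pvChild menu (n - 1)).foldl (fun o m => (o ++ pvChild menu (m - 2)) ++ [m]) out) ++ [n]) init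
      = init ++ xs.flatMap (g2 menu) := by
  have h : (fun (out : List Int) (n : Int) =>
      ((pvChild menu (n - 1)).foldl (fun o m => (o ++ pvChild menu (m - 2)) ++ [m]) out) ++ [n]) =
      fun out n => out ++ g2 menu n := by
    funext o n; rw [alt_loop2, g2, List.append_assoc]
  rw [h, PySem.List.foldl_append_eq_flatMap]

theorem alt_loop0 (menu : List (List (String × List Int))) (init : List Int) (xs : List Int) :
    xs.foldl (fun out n =>
        ((pvChild menu (n - 1)).foldl
          (fun o m =>
            ((pvChild menu (m - 1)).foldl (fun o2 k => (o2 ++ pvChild menu (k - 2)) ++ [k]) o) ++ [m]) out) ++ [n]) init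
      = init ++ xs.flatMap (g1 menu) := by
  have h : (fun (out : List Int) (n : Int) =>
      ((pvChild menu (n - 1)).foldl
        (fun o m =>
          ((pvChild menu (m - 1)).foldl (fun o2 k => (o2 ++ pvChild menu (k - 2)) ++ [k]) o) ++ [m]) out) ++ [n]) =
      fun out n => out ++ g1 menu n := by
    funext o n; rw [alt_loop1, g1, List.append_assoc]
  rw [h, PySem.List.foldl_append_eq_flatMap]

-- ===== VERDICT (by name: the statement is the Claim_ definition above) =====
theorem traceSubNodes_spec : Claim_equal_traceSubNodes := by
  intro cur subs menu debth _hdom hpre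
  unfold Spec_traceSubNodes traceSubNodes traceSubNodes_alt
  rcases hpre with ⟨h3, _⟩ | ⟨hne, hnil⟩ | ⟨h, _⟩ | ⟨h, _⟩ | ⟨h, _⟩
  · subst h3; rw [trace_d3, if_pos rfl]
  · subst hnil
    rw [if_neg hne, traceA.eq_def, if_neg hne]
    by_cases h2 : debth = 2 <;> by_cases h1 : debth = 1 <;> by_cases h0 : debth = 0 <;>
      simp_all
  · subst h
    rw [show (3 : Nat) = 2 + 1 from rfl, trace_d2,
      if_neg (show (2:Int) ≠ 3 by norm_num), if_pos rfl, alt_loop2, List.nil_append]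
  · subst h
    rw [show (3 : Nat) = 1 + 2 from rfl, trace_d1,
      if_neg (show (1:Int) ≠ 3 by norm_num), if_neg (show (1:Int) ≠ 2 by norm_num),
      if_pos rfl, alt_loop1, List.nil_append]
  · subst h
    rw [show (3 : Nat) = 0 + 3 from rfl, trace_d0,
      if_neg (show (0:Int) ≠ 3 by norm_num), if_neg (show (0:Int) ≠ 2 by norm_num),
      if_neg (show (0:Int) ≠ 1 by norm_num), if_pos rfl, alt_loop0, List.nil_append]
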